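-- pv_equiv track=rewrite | github.com/unitedconsumerrelief/doc_gpt_ucr | test_logic.py | get_program_sources_from_chunks
-- ===== SOURCE A (Python) =====
-- def get_program_sources_from_chunks(chunk_sources):
--     """
--     Extract program names from chunk sources, only counting Clarity and Elevate.
--     """
--     programs = set()
--     for source in chunk_sources:
--         source_lower = source.lower()
--         if "clarity" in source_lower or "affiliate_training_packet" in source_lower:
--             programs.add("Clarity")
--         if "elevate" in source_lower:
--             programs.add("Elevate")
--     return sorted(list(programs))
-- ===== SOURCE B (Python) =====
-- def get_program_sources_from_chunks(chunk_sources):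
--     def found(needles):
--         return any(n in s.lower() for s in chunk_sources for n in needles)
--     programs = []
--     if found(("clarity", "affiliate_training_packet")):
--         programs.append("Clarity")
--     if found(("elevate",)):
--         programs.append("Elevate")
--     return programs
-- ===== Notes on version B (the rewrite author's own statement) =====
-- stated objective: simpler
-- what changed: Pivot from one per-source pass maintaining a set (then sorted) to one independent short-circuiting scan per program name, appending the names in already-sorted order so no set and no sort are needed.
import Mathlib
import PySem

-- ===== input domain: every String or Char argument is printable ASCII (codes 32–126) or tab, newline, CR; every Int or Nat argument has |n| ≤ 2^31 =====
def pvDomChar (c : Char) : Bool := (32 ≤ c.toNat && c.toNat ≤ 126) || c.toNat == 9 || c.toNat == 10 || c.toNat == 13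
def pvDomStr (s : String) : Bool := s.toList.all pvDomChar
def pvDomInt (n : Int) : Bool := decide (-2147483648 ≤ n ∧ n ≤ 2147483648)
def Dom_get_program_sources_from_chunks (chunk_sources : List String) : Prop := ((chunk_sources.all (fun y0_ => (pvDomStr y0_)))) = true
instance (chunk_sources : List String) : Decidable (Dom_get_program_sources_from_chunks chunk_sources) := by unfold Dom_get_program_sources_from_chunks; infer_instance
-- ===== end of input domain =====

-- B replaces the per-source pass over a set (plus a final sort) by one independent
-- short-circuiting scan per program name, emitting the names in sorted order (objective: simpler).

-- ===== PORT A =====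
def pvStepA (acc : PySem.Set String) (source : String) : PySem.Set String :=
  let source_lower := PySem.Str.lower source
  let acc :=
    if PySem.Str.isIn "clarity" source_lower || PySem.Str.isIn "affiliate_training_packet" source_lower
    then PySem.Set.add acc "Clarity" else acc
  if PySem.Str.isIn "elevate" source_lower then PySem.Set.add acc "Elevate" else acc

def get_program_sources_from_chunks (chunk_sources : List String) : List String :=
  let programs := chunk_sources.foldl pvStepA PySem.Set.empty
  PySem.List.sorted programs (fun x => x) false

-- ===== PORT B =====
def pvFound (chunk_sources : List String) (needles : List String) : Bool :=
  chunk_sources.any (fun s => needles.any (fun n => PySem.Str.isIn n (PySem.Str.lower s)))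

def get_program_sources_from_chunks_alt (chunk_sources : List String) : List String :=
  (if pvFound chunk_sources ["clarity", "affiliate_training_packet"] then ["Clarity"] else []) ++
  (if pvFound chunk_sources ["elevate"] then ["Elevate"] else [])

-- ===== PRECONDITION & SPEC =====
def Spec_get_program_sources_from_chunks (chunk_sources : List String) (out : List String) : Prop := out = get_program_sources_from_chunks_alt chunk_sources
instance (chunk_sources : List String) (out : List String) : Decidable (Spec_get_program_sources_from_chunks chunk_sources out) := by unfold Spec_get_program_sources_from_chunks; infer_instance

-- ===== CLAIM (what is proved, stated in full; the proofs are below) =====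
def Claim_equal_get_program_sources_from_chunks : Prop := ∀ (chunk_sources : List String), Dom_get_program_sources_from_chunks chunk_sources → Spec_get_program_sources_from_chunks chunk_sources (get_program_sources_from_chunks chunk_sources)

-- ===== LEMMAS AND PROOFS =====

-- condition under which A adds "Clarity" / "Elevate" for one source
def pvClar (s : String) : Bool :=
  PySem.Str.isIn "clarity" (PySem.Str.lower s) || PySem.Str.isIn "affiliate_training_packet" (PySem.Str.lower s)
def pvElev (s : String) : Bool :=
  PySem.Str.isIn "elevate" (PySem.Str.lower s)

lemma add_mem (acc : List String) (x : String) (h : x ∈ acc) : PySem.Set.add acc x = acc := by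
  simp [PySem.Set.add, PySem.Set.contains_eq_listContains, h]

lemma stepA_absorb (acc : List String) (h1 : "Clarity" ∈ acc) (h2 : "Elevate" ∈ acc)
    (x : String) : pvStepA acc x = acc := by
  simp only [pvStepA, add_mem acc _ h1]
  split_ifs <;> simp [add_mem acc _ h2]

lemma foldA_absorb (acc : List String) (h1 : "Clarity" ∈ acc) (h2 : "Elevate" ∈ acc) :
    ∀ xs : List String, xs.foldl pvStepA acc = acc := by
  intro xs; induction xs with
  | nil => rfl
  | cons x xs ih => simp [List.foldl, stepA_absorb acc h1 h2 x, ih]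

lemma stepA_cases (acc : List String) (x : String) :
    pvStepA acc x =
      (if pvElev x then
        PySem.Set.add (if pvClar x then PySem.Set.add acc "Clarity" else acc) "Elevate"
       else (if pvClar x then PySem.Set.add acc "Clarity" else acc)) := by
  simp [pvStepA, pvClar, pvElev]

lemma foldA_fromC : ∀ xs : List String,
    xs.foldl pvStepA ["Clarity"] = if xs.any pvElev then ["Clarity", "Elevate"] else ["Clarity"] := by
  intro xs; induction xs with
  | nil => rfl
  | cons x xs ih =>
    simp only [List.foldl, List.any_cons, stepA_cases]
    by_cases he : pvElev x = true
    · have : pvStepA ["Clarity"] x = ["Clarity", "Elevate"] := by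
        rw [stepA_cases]
        by_cases hc : pvClar x = true <;>
          simp [hc, he, PySem.Set.add, PySem.Set.contains_eq_listContains]
      rw [show (if pvElev x then PySem.Set.add (if pvClar x then PySem.Set.add ["Clarity"] "Clarity" else ["Clarity"]) "Elevate" else (if pvClar x then PySem.Set.add ["Clarity"] "Clarity" else ["Clarity"])) = pvStepA ["Clarity"] x from (stepA_cases _ _).symm, this,
        foldA_absorb _ (by simp) (by simp)]
      simp [he]
    · have hx : pvClar x = true ∨ pvClar x = false := by
        cases pvClar x <;> simp
      have : (if pvElev x then PySem.Set.add (if pvClar x then PySem.Set.add ["Clarity"] "Clarity" else ["Clarity"]) "Elevate" else (if pvClar x then PySem.Set.add ["Clarity"] "Clarity" else ["Clarity"])) = ["Clarity"] := by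
        rcases hx with hc | hc <;>
          simp [hc, he, PySem.Set.add, PySem.Set.contains_eq_listContains]
      rw [this, ih]
      simp [he]

lemma foldA_fromE : ∀ xs : List String,
    xs.foldl pvStepA ["Elevate"] = if xs.any pvClar then ["Elevate", "Clarity"] else ["Elevate"] := by
  intro xs; induction xs with
  | nil => rfl
  | cons x xs ih =>
    simp only [List.foldl, List.any_cons]
    by_cases hc : pvClar x = true
    · have : pvStepA ["Elevate"] x = ["Elevate", "Clarity"] := by
        rw [stepA_cases]
        by_cases he : pvElev x = true <;>
          simp [hc, he, PySem.Set.add, PySem.Set.contains_eq_listContains]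
      rw [this, foldA_absorb _ (by simp) (by simp)]
      simp [hc]
    · have : pvStepA ["Elevate"] x = ["Elevate"] := by
        rw [stepA_cases]
        by_cases he : pvElev x = true <;>
          simp [hc, he, PySem.Set.add, PySem.Set.contains_eq_listContains]
      rw [this, ih]
      simp [hc]

lemma pvFound_clar (xs : List String) :
    pvFound xs ["clarity", "affiliate_training_packet"] = xs.any pvClar := by
  unfold pvFound; congr 1; funext s; simp [pvClar]

lemma pvFound_elev (xs : List String) :
    pvFound xs ["elevate"] = xs.any pvElev := by
  unfold pvFound; congr 1; funext s; simp [pvElev]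

lemma sCE : PySem.List.sorted ["Clarity","Elevate"] (fun x : String => x) false = ["Clarity","Elevate"] :=
  PySem.List.sorted_eq_self_of_pairwise _ _ (by simp; exact le_of_lt (by decide))

lemma sEC : PySem.List.sorted ["Elevate","Clarity"] (fun x : String => x) false = ["Clarity","Elevate"] :=
  PySem.List.sorted_eq_of_perm_of_pairwise_lt _ _ _ (List.Perm.swap _ _ _) (by simp; decide)

lemma sC : PySem.List.sorted ["Clarity"] (fun x : String => x) false = ["Clarity"] :=
  PySem.List.sorted_eq_self_of_pairwise _ _ (List.pairwise_singleton _ _)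

lemma sE : PySem.List.sorted ["Elevate"] (fun x : String => x) false = ["Elevate"] :=
  PySem.List.sorted_eq_self_of_pairwise _ _ (List.pairwise_singleton _ _)

lemma main_lemma : ∀ xs : List String,
    PySem.List.sorted (xs.foldl pvStepA PySem.Set.empty) (fun x => x) false =
      (if xs.any pvClar then ["Clarity"] else []) ++ (if xs.any pvElev then ["Elevate"] else []) := by
  intro xs; induction xs with
  | nil => rfl
  | cons x xs ih =>
    simp only [List.foldl, List.any_cons]
    by_cases hc : pvClar x = true <;> by_cases he : pvElev x = true
    · have : pvStepA PySem.Set.empty x = ["Clarity", "Elevate"] := by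
        rw [stepA_cases]
        simp [hc, he, PySem.Set.add, PySem.Set.empty, PySem.Set.contains_eq_listContains]
      rw [this, foldA_absorb _ (by simp) (by simp), sCE]
      simp [hc, he]
    · have : pvStepA PySem.Set.empty x = ["Clarity"] := by
        rw [stepA_cases]
        simp [hc, he, PySem.Set.add, PySem.Set.empty, PySem.Set.contains_eq_listContains]
      rw [this, foldA_fromC]
      by_cases h2 : xs.any pvElev = true <;> simp [hc, he, h2, sCE, sC]
    · have : pvStepA PySem.Set.empty x = ["Elevate"] := by
        rw [stepA_cases]
        simp [hc, he, PySem.Set.add, PySem.Set.empty, PySem.Set.contains_eq_listContains]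
      rw [this, foldA_fromE]
      by_cases h2 : xs.any pvClar = true <;> simp [hc, he, h2, sEC, sE]
    · have : pvStepA PySem.Set.empty x = PySem.Set.empty := by
        rw [stepA_cases]
        simp [hc, he]
      rw [this, ih]
      simp [hc, he]

-- ===== VERDICT (by name: the statement is the Claim_ definition above) =====
theorem get_program_sources_from_chunks_spec : Claim_equal_get_program_sources_from_chunks := by
  intro xs _
  show _ = _
  rw [get_program_sources_from_chunks, get_program_sources_from_chunks_alt,
    pvFound_clar, pvFound_elev]
  exact main_lemma xs
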